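-- pv_equiv track=rewrite | github.com/pooja654/crossword_generator | generate.py | ranked_by_num_intersections
-- ===== SOURCE A (Python) =====
-- def ranked_by_num_intersections(words_to_rank, clues_dict):
--   ranked_words = []
--   for word1 in clues_dict.keys():
--     # count = number of intersections between current words in puzzle and all other words
--     count = 0
--     for word2 in words_to_rank:
--       if(not(word1 == word2)):
--         for l in word1:
--           if l in word2:
--             count +=1
--
--     if(count != 0):
--       ranked_words.append((count, word1))
--
--   if ranked_words == []:
--     return None
--
--   return sorted(ranked_words, key=lambda x: x[0], reverse=True)
-- ===== SOURCE B (Python) =====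
-- def ranked_by_num_intersections(words_to_rank, clues_dict):
--     # One pass over words_to_rank builds a letter document-frequency table df
--     # (how many words contain each letter) and a multiplicity table n1; each
--     # word1's count is then a per-letter sum minus the self-intersection term.
--     df = {}
--     n1 = {}
--     for w2 in words_to_rank:
--         n1[w2] = n1.get(w2, 0) + 1
--         for c in set(w2):
--             df[c] = df.get(c, 0) + 1
--     ranked = []
--     for w1 in clues_dict.keys():
--         count = sum(df.get(c, 0) for c in w1) - n1.get(w1, 0) * len(w1)
--         if count != 0:
--             ranked.append((count, w1))
--     return sorted(ranked, key=lambda x: x[0], reverse=True) if ranked else None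
-- ===== Notes on version B (the rewrite author's own statement) =====
-- stated objective: faster
-- what changed: Replaces the per-pair nested scan (every clue word against every word of words_to_rank against every letter) by a single pass that builds a letter document-frequency dict and a word-multiplicity dict, after which each clue word's count is a per-letter table sum minus a self-intersection correction.
import Mathlib
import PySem

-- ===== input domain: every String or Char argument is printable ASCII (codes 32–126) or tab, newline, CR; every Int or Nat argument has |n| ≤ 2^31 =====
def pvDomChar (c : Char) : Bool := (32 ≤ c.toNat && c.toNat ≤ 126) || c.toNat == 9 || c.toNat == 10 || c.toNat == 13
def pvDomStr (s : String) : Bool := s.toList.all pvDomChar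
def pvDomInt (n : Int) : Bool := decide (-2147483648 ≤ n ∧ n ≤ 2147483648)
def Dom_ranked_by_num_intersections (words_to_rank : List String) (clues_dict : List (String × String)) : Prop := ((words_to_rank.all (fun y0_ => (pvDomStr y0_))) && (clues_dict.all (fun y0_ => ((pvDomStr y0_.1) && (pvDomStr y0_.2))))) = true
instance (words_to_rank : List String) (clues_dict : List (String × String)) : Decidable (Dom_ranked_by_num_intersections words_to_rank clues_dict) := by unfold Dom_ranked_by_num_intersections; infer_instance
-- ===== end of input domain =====

-- B replaces A's triple nested scan by one document-frequency pass plus a per-clue table sum (objective: faster).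

-- ===== PORT A =====
-- 'l in word2' for a single character l is exact as character membership.
def ranked_by_num_intersections (words_to_rank : List String) (clues_dict : List (String × String)) : Option (List (Int × String)) :=
  let ranked_words : List (Int × String) :=
    (PySem.List.dedup (clues_dict.map Prod.fst)).foldl (fun ranked word1 =>
      let count : Int :=
        words_to_rank.foldl (fun count word2 =>
          if !(word1 == word2) then
            word1.toList.foldl (fun c l => if word2.toList.contains l then c + 1 else c) count
          else count) 0
      if count ≠ 0 then ranked ++ [(count, word1)] else ranked) []
  if ranked_words = [] then none
  else some (PySem.List.sorted ranked_words (fun x => x.1) true)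

-- ===== PORT B =====
def ranked_by_num_intersections_alt (words_to_rank : List String) (clues_dict : List (String × String)) : Option (List (Int × String)) :=
  let st : PySem.Dict Char Int × PySem.Dict String Int :=
    words_to_rank.foldl (fun st w2 =>
      let n1 := st.2.modify w2 0 (· + 1)
      let df := (PySem.Set.ofList w2.toList).foldl (fun d c => d.modify c 0 (· + 1)) st.1
      (df, n1)) (PySem.Dict.empty, PySem.Dict.empty)
  let ranked : List (Int × String) :=
    (PySem.List.dedup (clues_dict.map Prod.fst)).foldl (fun acc w1 =>
      let count : Int := (w1.toList.map (fun c => st.1.getD c 0)).sum - st.2.getD w1 0 * PySem.Str.len w1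
      if count ≠ 0 then acc ++ [(count, w1)] else acc) []
  if ranked = [] then none
  else some (PySem.List.sorted ranked (fun x => x.1) true)

-- ===== PRECONDITION & SPEC =====
def Spec_ranked_by_num_intersections (words_to_rank : List String) (clues_dict : List (String × String)) (out : Option (List (Int × String))) : Prop := out = ranked_by_num_intersections_alt words_to_rank clues_dict
instance (words_to_rank : List String) (clues_dict : List (String × String)) (out : Option (List (Int × String))) : Decidable (Spec_ranked_by_num_intersections words_to_rank clues_dict out) := by unfold Spec_ranked_by_num_intersections; infer_instance

-- ===== CLAIM (what is proved, stated in full; the proofs are below) =====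
def Claim_equal_ranked_by_num_intersections : Prop := ∀ (words_to_rank : List String) (clues_dict : List (String × String)), Dom_ranked_by_num_intersections words_to_rank clues_dict → Spec_ranked_by_num_intersections words_to_rank clues_dict (ranked_by_num_intersections words_to_rank clues_dict)

-- ===== LEMMAS AND PROOFS =====

-- the pair fold in B splits into its two component folds
theorem pvPairFold (words : List String) (d1 : PySem.Dict Char Int) (d2 : PySem.Dict String Int) :
    words.foldl (fun st w2 =>
      ((PySem.Set.ofList w2.toList).foldl (fun d c => d.modify c 0 (· + 1)) st.1,
       st.2.modify w2 0 (· + 1))) (d1, d2)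
    = (words.foldl (fun d w2 => (PySem.Set.ofList w2.toList).foldl (fun d c => d.modify c 0 (· + 1)) d) d1,
       words.foldl (fun d w2 => d.modify w2 0 (· + 1)) d2) := by
  induction words generalizing d1 d2 with
  | nil => rfl
  | cons w ws ih => simp [List.foldl, ih]

-- df characterisation: the document-frequency of a character
theorem pvDF (words : List String) (d : PySem.Dict Char Int) (c : Char) :
    (words.foldl (fun d w2 => (PySem.Set.ofList w2.toList).foldl (fun d c => d.modify c 0 (· + 1)) d) d).getD c 0
    = d.getD c 0 + (words.countP (fun w => w.toList.contains c) : Int) := by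
  induction words generalizing d with
  | nil => simp
  | cons w ws ih =>
    simp only [List.foldl, ih, PySem.Dict.getD_foldl_modify_add_one, List.countP_cons]
    have : (PySem.Set.ofList w.toList).count c = if w.toList.contains c then 1 else 0 := by
      by_cases h : c ∈ w.toList
      · rw [List.count_eq_one_of_mem (PySem.Set.nodup_ofList _) (by simpa [PySem.Set.mem_ofList] using h)]
        simp [h]
      · rw [List.count_eq_zero_of_not_mem (by simpa [PySem.Set.mem_ofList] using h)]
        simp [h]
    rw [this]
    push_cast
    split_ifs <;> ring

-- exchanging the two sums: per-letter document frequency sums to the per-word intersection counts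
theorem pvExchange (l1 : List Char) (words : List String) :
    (l1.map (fun c => (words.countP (fun w => w.toList.contains c) : Int))).sum
    = words.foldl (fun s w => s + (l1.countP (fun c => w.toList.contains c) : Int)) 0 := by
  rw [PySem.List.foldl_add]
  induction words with
  | nil => simp
  | cons w ws ih =>
    simp only [List.countP_cons, List.map_cons, List.sum_cons]
    have h1 : (l1.map (fun c => ((ws.countP (fun w' => w'.toList.contains c) + if w.toList.contains c then 1 else 0 : Nat) : Int))).sum
        = (l1.map (fun c => (ws.countP (fun w' => w'.toList.contains c) : Int))).sum
          + (l1.map (fun c => if w.toList.contains c then (1:Int) else 0)).sum := by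
      rw [← List.sum_map_add]
      apply congrArg List.sum
      apply List.map_congr_left
      intro c _
      push_cast
      split_ifs <;> ring_nf
    push_cast at h1 ⊢
    rw [h1, ih, PySem.List.sum_map_ite_one_zero]
    ring

-- A's accumulator for one clue word, in closed form
theorem pvACount (l1 : List Char) (w1 : String) (words : List String) (a : Int) :
    words.foldl (fun count w2 =>
      if !(w1 == w2) then
        l1.foldl (fun c l => if w2.toList.contains l then c + 1 else c) count
      else count) a
    = a + words.foldl (fun s w => s + (l1.countP (fun c => w.toList.contains c) : Int)) 0
        - (words.count w1 : Int) * (l1.countP (fun c => w1.toList.contains c) : Int) := by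
  induction words generalizing a with
  | nil => simp
  | cons w ws ih =>
    simp only [PySem.List.foldl_add] at ih ⊢
    rw [List.foldl_cons]
    by_cases h : w1 = w
    · subst h
      rw [if_neg (by simp), ih, List.count_cons_self]
      simp only [List.map_cons, List.sum_cons]
      push_cast
      ring_nf
    · rw [if_pos (by simp [h]), PySem.List.foldl_if_add_one, ih, List.count_cons_of_ne (by simpa using Ne.symm h)]
      simp only [List.map_cons, List.sum_cons]
      ring

-- every character of a word is contained in it
theorem pvSelf (w1 : String) :
    (w1.toList.countP (fun c => w1.toList.contains c) : Int) = (w1.toList.length : Int) := by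
  congr 1
  rw [List.countP_eq_length]
  intro a ha; simpa using ha

-- the per-clue counts of A and B coincide
theorem pvCountEq (words : List String) (w1 : String) :
    words.foldl (fun count w2 =>
      if !(w1 == w2) then
        w1.toList.foldl (fun c l => if w2.toList.contains l then c + 1 else c) count
      else count) 0
    = (w1.toList.map (fun c =>
        (words.foldl (fun d w2 => (PySem.Set.ofList w2.toList).foldl (fun d c => d.modify c 0 (· + 1)) d) PySem.Dict.empty).getD c 0)).sum
      - (words.foldl (fun d w2 => d.modify w2 0 (· + 1)) PySem.Dict.empty).getD w1 0 * (w1.toList.length : Int) := by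
  have hdf : (w1.toList.map (fun c =>
      (words.foldl (fun d w2 => (PySem.Set.ofList w2.toList).foldl (fun d c => d.modify c 0 (· + 1)) d) PySem.Dict.empty).getD c 0)).sum
      = (w1.toList.map (fun c => (words.countP (fun w => w.toList.contains c) : Int))).sum := by
    apply congrArg List.sum
    apply List.map_congr_left
    intro c _
    rw [pvDF]; simp
  have hn1 : (words.foldl (fun d w2 => d.modify w2 0 (· + 1)) PySem.Dict.empty).getD w1 0
      = (words.count w1 : Int) := by
    rw [PySem.Dict.getD_foldl_modify_add_one]; simp
  rw [pvACount, hdf, hn1, pvExchange, ← pvSelf w1]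
  ring

-- ===== VERDICT (by name: the statement is the Claim_ definition above) =====
theorem ranked_by_num_intersections_spec : Claim_equal_ranked_by_num_intersections := by
  intro words_to_rank clues_dict _
  unfold Spec_ranked_by_num_intersections ranked_by_num_intersections ranked_by_num_intersections_alt
  rw [pvPairFold]
  have hbody : (fun (ranked : List (Int × String)) (word1 : String) =>
      let count : Int :=
        words_to_rank.foldl (fun count word2 =>
          if !(word1 == word2) then
            word1.toList.foldl (fun c l => if word2.toList.contains l then c + 1 else c) count
          else count) 0
      if count ≠ 0 then ranked ++ [(count, word1)] else ranked)
      = (fun (acc : List (Int × String)) (w1 : String) =>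
      let count : Int := (w1.toList.map (fun c =>
        (words_to_rank.foldl (fun d w2 => (PySem.Set.ofList w2.toList).foldl (fun d c => d.modify c 0 (· + 1)) d) PySem.Dict.empty).getD c 0)).sum
        - (words_to_rank.foldl (fun d w2 => d.modify w2 0 (· + 1)) PySem.Dict.empty).getD w1 0 * PySem.Str.len w1
      if count ≠ 0 then acc ++ [(count, w1)] else acc) := by
    funext acc w1
    simp only [PySem.Str.len_eq]
    rw [pvCountEq]
  rw [hbody]
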